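-- pv_equiv track=rewrite | github.com/angrysky56/openended-philosophy-mcp | openended_philosophy/lv_nars_integration.py | _determine_perspectives
-- ===== SOURCE A (Python) =====
-- from typing import Any, Optional
--
-- def _determine_perspectives(query: str, context: dict[str, Any] | None) -> list[str]:
--     """Determine relevant philosophical perspectives."""
--     if context and 'perspectives' in context:
--         return context['perspectives']
--
--     # Default perspectives based on query content
--     query_lower = query.lower()
--     perspectives = []
--
--     if any(term in query_lower for term in ['mind', 'consciousness', 'experience']):
--         perspectives.append('phenomenological')
--
--     if any(term in query_lower for term in ['logic', 'reason', 'argument']):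
--         perspectives.append('analytical')
--
--     if any(term in query_lower for term in ['good', 'right', 'moral', 'ethics']):
--         perspectives.append('ethical')
--
--     if any(term in query_lower for term in ['reality', 'existence', 'being']):
--         perspectives.append('metaphysical')
--
--     if any(term in query_lower for term in ['know', 'truth', 'belief']):
--         perspectives.append('epistemological')
--
--     # Default perspectives if none detected
--     if not perspectives:
--         perspectives = ['analytical', 'phenomenological']
--
--     return perspectives
-- ===== SOURCE B (Python) =====
-- # B: one forward scan over the query; at each position mark the tag of any term
-- # starting there, then emit the matched tags in the canonical order.
-- _TERMS = [
--     ('mind', 'phenomenological'), ('consciousness', 'phenomenological'),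
--     ('experience', 'phenomenological'),
--     ('logic', 'analytical'), ('reason', 'analytical'), ('argument', 'analytical'),
--     ('good', 'ethical'), ('right', 'ethical'), ('moral', 'ethical'), ('ethics', 'ethical'),
--     ('reality', 'metaphysical'), ('existence', 'metaphysical'), ('being', 'metaphysical'),
--     ('know', 'epistemological'), ('truth', 'epistemological'), ('belief', 'epistemological'),
-- ]
-- _ORDER = ['phenomenological', 'analytical', 'ethical', 'metaphysical', 'epistemological']
--
--
-- def _determine_perspectives(query, context):
--     """Determine relevant philosophical perspectives (single scan over the query)."""
--     if context and 'perspectives' in context: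
--         return context['perspectives']
--     q = query.lower()
--     found = set()
--     for i in range(len(q)):
--         for term, tag in _TERMS:
--             if q.startswith(term, i):
--                 found.add(tag)
--     tags = [t for t in _ORDER if t in found]
--     return tags or ['analytical', 'phenomenological']
-- ===== Notes on version B (the rewrite author's own statement) =====
-- stated objective: alternative
-- what changed: Instead of five independent substring searches, B makes one forward scan over the lowered query, testing at each position which trigger term starts there and accumulating the matched tags in a set, then emits them in the canonical order with the same fallback.
import Mathlib
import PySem

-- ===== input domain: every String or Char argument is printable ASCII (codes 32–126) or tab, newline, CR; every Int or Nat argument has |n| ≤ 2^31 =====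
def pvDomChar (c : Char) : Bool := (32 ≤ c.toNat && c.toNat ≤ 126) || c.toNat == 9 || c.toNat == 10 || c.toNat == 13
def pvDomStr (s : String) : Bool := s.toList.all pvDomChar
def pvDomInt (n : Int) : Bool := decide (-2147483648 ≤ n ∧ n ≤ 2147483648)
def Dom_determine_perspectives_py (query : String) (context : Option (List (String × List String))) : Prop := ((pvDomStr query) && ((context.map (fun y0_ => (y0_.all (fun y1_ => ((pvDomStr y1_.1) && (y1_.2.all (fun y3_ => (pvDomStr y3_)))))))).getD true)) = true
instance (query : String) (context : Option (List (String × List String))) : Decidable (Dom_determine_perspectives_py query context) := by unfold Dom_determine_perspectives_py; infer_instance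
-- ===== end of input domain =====

-- B replaces A's five independent substring searches with a single forward scan:
-- at each position of the lowered query it marks the tag of any term starting there
-- (a set), then emits the matched tags in the canonical order; same fallback.
-- Return value only.

-- ===== PORT A =====
-- the chain of five ifs appending tags, then the fallback
def pvDefaultA (query : String) : List String :=
  let query_lower := PySem.Str.lower query
  let perspectives : List String := []
  let perspectives := if (["mind", "consciousness", "experience"].any fun t => PySem.Str.isIn t query_lower) then perspectives ++ ["phenomenological"] else perspectives
  let perspectives := if (["logic", "reason", "argument"].any fun t => PySem.Str.isIn t query_lower) then perspectives ++ ["analytical"] else perspectives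
  let perspectives := if (["good", "right", "moral", "ethics"].any fun t => PySem.Str.isIn t query_lower) then perspectives ++ ["ethical"] else perspectives
  let perspectives := if (["reality", "existence", "being"].any fun t => PySem.Str.isIn t query_lower) then perspectives ++ ["metaphysical"] else perspectives
  let perspectives := if (["know", "truth", "belief"].any fun t => PySem.Str.isIn t query_lower) then perspectives ++ ["epistemological"] else perspectives
  if perspectives = [] then ["analytical", "phenomenological"] else perspectives

def determine_perspectives_py (query : String) (context : Option (List (String × List String))) : List String :=
  match context with
  | some ctx =>
      -- `context and 'perspectives' in context`: truthy dict with the key present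
      if ctx ≠ [] ∧ (PySem.Dict.mk ctx).contains "perspectives" then
        (PySem.Dict.mk ctx).getD "perspectives" []
      else pvDefaultA query
  | none => pvDefaultA query

-- ===== PORT B =====
def pvTerms : List (String × String) :=
  [("mind", "phenomenological"), ("consciousness", "phenomenological"),
   ("experience", "phenomenological"),
   ("logic", "analytical"), ("reason", "analytical"), ("argument", "analytical"),
   ("good", "ethical"), ("right", "ethical"), ("moral", "ethical"), ("ethics", "ethical"),
   ("reality", "metaphysical"), ("existence", "metaphysical"), ("being", "metaphysical"),
   ("know", "epistemological"), ("truth", "epistemological"), ("belief", "epistemological")]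

def pvOrder : List String :=
  ["phenomenological", "analytical", "ethical", "metaphysical", "epistemological"]

def pvDefaultB (query : String) : List String :=
  let q := (PySem.Str.lower query).toList
  -- for i in range(len(q)): for term, tag in _TERMS: if q.startswith(term, i): found.add(tag)
  let found : PySem.Set String :=
    (List.range q.length).foldl
      (fun s i =>
        pvTerms.foldl
          (fun s p => if p.1.toList.isPrefixOf (q.drop i) then PySem.Set.add s p.2 else s)
          s)
      PySem.Set.empty
  let tags := pvOrder.filter (fun t => PySem.Set.contains found t)
  if tags = [] then ["analytical", "phenomenological"] else tags

def determine_perspectives_py_alt (query : String) (context : Option (List (String × List String))) : List String :=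
  match context with
  | some ctx =>
      if ctx ≠ [] ∧ (PySem.Dict.mk ctx).contains "perspectives" then
        (PySem.Dict.mk ctx).getD "perspectives" []
      else pvDefaultB query
  | none => pvDefaultB query

-- ===== PRECONDITION & SPEC =====
def Spec_determine_perspectives_py (query : String) (context : Option (List (String × List String))) (out : List String) : Prop := out = determine_perspectives_py_alt query context
instance (query : String) (context : Option (List (String × List String))) (out : List String) : Decidable (Spec_determine_perspectives_py query context out) := by unfold Spec_determine_perspectives_py; infer_instance

-- ===== CLAIM =====
def Claim_equal_determine_perspectives_py : Prop := ∀ (query : String) (context : Option (List (String × List String))), Dom_determine_perspectives_py query context → Spec_determine_perspectives_py query context (determine_perspectives_py query context)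

-- ===== LEMMAS AND PROOFS =====

-- membership after the inner fold over the term table
theorem pv_mem_inner (L : List (String × String)) (c : String × String → Bool)
    (s : PySem.Set String) (x : String) :
    x ∈ L.foldl (fun s p => if c p then PySem.Set.add s p.2 else s) s
      ↔ x ∈ s ∨ ∃ p ∈ L, c p = true ∧ x = p.2 := by
  induction L generalizing s with
  | nil => simp
  | cons hd tl ih =>
      simp only [List.foldl_cons, ih]
      by_cases h : c hd = true <;> simp [h, PySem.Set.mem_add] <;> tauto

-- membership after the outer fold over the position list
theorem pv_mem_outer (L : List Nat) (q : List Char) (s : PySem.Set String) (x : String) :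
    x ∈ L.foldl
        (fun s i => pvTerms.foldl
          (fun s p => if p.1.toList.isPrefixOf (q.drop i) then PySem.Set.add s p.2 else s) s)
        s
      ↔ x ∈ s ∨ ∃ i ∈ L, ∃ p ∈ pvTerms, p.1.toList.isPrefixOf (q.drop i) = true ∧ x = p.2 := by
  induction L generalizing s with
  | nil => simp
  | cons hd tl ih =>
      simp only [List.foldl_cons, ih, pv_mem_inner, List.mem_cons]
      constructor
      · rintro ((h | ⟨p, hp, hc, rfl⟩) | ⟨i, hi, p, hp, hc, rfl⟩)
        · exact Or.inl h
        · exact Or.inr ⟨hd, Or.inl rfl, p, hp, hc, rfl⟩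
        · exact Or.inr ⟨i, Or.inr hi, p, hp, hc, rfl⟩
      · rintro (h | ⟨i, (rfl | hi), p, hp, hc, rfl⟩)
        · exact Or.inl (Or.inl h)
        · exact Or.inl (Or.inr ⟨p, hp, hc, rfl⟩)
        · exact Or.inr ⟨i, hi, p, hp, hc, rfl⟩

-- a nonempty pattern occurs at some position < length iff it is a substring
theorem pv_exists_lt_prefix_iff (sub s : List Char) (h : sub ≠ []) :
    (∃ i, i < s.length ∧ sub.isPrefixOf (s.drop i) = true) ↔ PySem.Chars.isIn sub s = true := by
  rw [← PySem.Chars.exists_prefix_drop_iff_isIn]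
  constructor
  · rintro ⟨i, _, hp⟩; exact ⟨i, List.isPrefixOf_iff_prefix.mp hp⟩
  · rintro ⟨j, hp⟩
    by_cases hj : j < s.length
    · exact ⟨j, hj, List.isPrefixOf_iff_prefix.mpr hp⟩
    · exfalso
      have hnil : s.drop j = [] := List.drop_eq_nil_of_le (le_of_not_gt hj)
      rw [hnil] at hp
      exact h (List.prefix_nil.mp hp)

-- the found set of B's scan (proof-side name for the fold in pvDefaultB)
def pvFound (query : String) : PySem.Set String :=
  (List.range (PySem.Str.lower query).toList.length).foldl
    (fun s i => pvTerms.foldl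
      (fun s p => if p.1.toList.isPrefixOf ((PySem.Str.lower query).toList.drop i) then PySem.Set.add s p.2 else s) s)
    PySem.Set.empty

-- the found set contains each tag exactly when one of its terms is a substring
theorem pv_mem_found (query : String) (tag : String) :
    tag ∈ pvFound query
      ↔ ∃ p ∈ pvTerms, PySem.Str.isIn p.1 (PySem.Str.lower query) = true ∧ tag = p.2 := by
  unfold pvFound
  rw [pv_mem_outer]
  simp only [PySem.Set.empty, List.not_mem_nil, false_or, List.mem_range]
  constructor
  · rintro ⟨i, hi, p, hp, hpre, rfl⟩
    refine ⟨p, hp, ?_, rfl⟩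
    rw [PySem.Str.isIn_eq]
    have hne : p.1.toList ≠ [] := by fin_cases hp <;> decide
    exact (pv_exists_lt_prefix_iff _ _ hne).mp ⟨i, hi, hpre⟩
  · rintro ⟨p, hp, hin, rfl⟩
    rw [PySem.Str.isIn_eq] at hin
    have hne : p.1.toList ≠ [] := by fin_cases hp <;> decide
    obtain ⟨i, hi, hpre⟩ := (pv_exists_lt_prefix_iff _ _ hne).mpr hin
    exact ⟨i, hi, p, hp, hpre, rfl⟩

theorem pv_contains_found (query : String) (tag : String) (L : List String)
    (h : (∃ p ∈ pvTerms, PySem.Str.isIn p.1 (PySem.Str.lower query) = true ∧ tag = p.2)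
          ↔ (L.any fun t => PySem.Str.isIn t (PySem.Str.lower query)) = true) :
    PySem.Set.contains (pvFound query) tag
      = (L.any fun t => PySem.Str.isIn t (PySem.Str.lower query)) := by
  rw [Bool.eq_iff_iff, PySem.Set.contains_iff, pv_mem_found]
  exact h

theorem pvDefault_eq (query : String) : pvDefaultA query = pvDefaultB query := by
  have hB : pvDefaultB query =
      (if (pvOrder.filter fun t => PySem.Set.contains (pvFound query) t) = []
       then ["analytical", "phenomenological"]
       else pvOrder.filter fun t => PySem.Set.contains (pvFound query) t) := rfl
  have h1 := pv_contains_found query "phenomenological" ["mind", "consciousness", "experience"]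
    (by simp [pvTerms])
  have h2 := pv_contains_found query "analytical" ["logic", "reason", "argument"]
    (by simp [pvTerms])
  have h3 := pv_contains_found query "ethical" ["good", "right", "moral", "ethics"]
    (by simp [pvTerms])
  have h4 := pv_contains_found query "metaphysical" ["reality", "existence", "being"]
    (by simp [pvTerms])
  have h5 := pv_contains_found query "epistemological" ["know", "truth", "belief"]
    (by simp [pvTerms])
  rw [hB]
  unfold pvDefaultA
  simp only [pvOrder, List.filter_cons, List.filter_nil, h1, h2, h3, h4, h5]
  cases (["mind", "consciousness", "experience"].any fun t => PySem.Str.isIn t (PySem.Str.lower query)) <;>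
  cases (["logic", "reason", "argument"].any fun t => PySem.Str.isIn t (PySem.Str.lower query)) <;>
  cases (["good", "right", "moral", "ethics"].any fun t => PySem.Str.isIn t (PySem.Str.lower query)) <;>
  cases (["reality", "existence", "being"].any fun t => PySem.Str.isIn t (PySem.Str.lower query)) <;>
  cases (["know", "truth", "belief"].any fun t => PySem.Str.isIn t (PySem.Str.lower query)) <;>
  simp

-- ===== VERDICT =====
theorem determine_perspectives_py_spec : Claim_equal_determine_perspectives_py := by
  intro query context _
  unfold Spec_determine_perspectives_py
  cases context with
  | none =>
      simp only [determine_perspectives_py, determine_perspectives_py_alt]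
      exact pvDefault_eq query
  | some ctx =>
      simp only [determine_perspectives_py, determine_perspectives_py_alt]
      split_ifs
      · rfl
      · exact pvDefault_eq query
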